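-- pv_equiv track=rewrite | github.com/MahdiRiahi10/Sudoku-solver | Sudoku Solver/sudokuSolver.py | insertBorders
-- ===== SOURCE A (Python) =====
-- def insertBorders(board):
--     borderList = ['-'] * len(board)
--     resultList = []
--     count = 0
--     for row in board:
--         resultList.append(row)
--         count += 1
--         if count == 3:
--             resultList.append(borderList)
--             count = 0
--
--     resultList.insert(0, borderList)
--     return resultList
-- ===== SOURCE B (Python) =====
-- def insertBorders(board):
--     border = ['-'] * len(board)
--     result = [border]
--     rest = board
--     while rest:
--         chunk, rest = rest[:3], rest[3:]
--         result += chunk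
--         if len(chunk) == 3:
--             result.append(border)
--     return result
-- ===== Notes on version B (the rewrite author's own statement) =====
-- stated objective: simpler
-- what changed: Replaces the per-row loop with a row counter and final insert(0, ...) by chunk-peeling: start the result with one border and repeatedly split off a 3-row chunk, appending a border only after full chunks.
import Mathlib
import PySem

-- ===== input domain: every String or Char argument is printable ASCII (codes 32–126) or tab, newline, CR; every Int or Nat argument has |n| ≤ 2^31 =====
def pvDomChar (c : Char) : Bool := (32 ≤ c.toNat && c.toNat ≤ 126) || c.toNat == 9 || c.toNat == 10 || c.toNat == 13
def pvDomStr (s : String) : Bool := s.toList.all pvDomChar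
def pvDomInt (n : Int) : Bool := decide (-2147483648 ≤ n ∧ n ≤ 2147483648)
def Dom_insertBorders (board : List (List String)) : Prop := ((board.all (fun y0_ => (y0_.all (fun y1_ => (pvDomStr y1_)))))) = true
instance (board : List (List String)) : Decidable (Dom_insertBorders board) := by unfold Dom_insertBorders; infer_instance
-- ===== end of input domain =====

-- B is a simpler decomposition of A (chunk-peeling instead of a row counter); return values proved equal on all inputs.

-- ===== PORT A =====
-- literal port of A: fold over rows carrying (resultList, count); final insert(0, border) is the cons
def insertStepA (borderList : List String) (s : List (List String) × Nat) (row : List String) :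
    List (List String) × Nat :=
  let resultList := s.1 ++ [row]
  let count := s.2 + 1
  if count = 3 then (resultList ++ [borderList], 0) else (resultList, count)

def insertBorders (board : List (List String)) : List (List String) :=
  let borderList : List String := List.replicate board.length "-"
  let s := board.foldl (insertStepA borderList) ([], 0)
  borderList :: s.1

-- ===== PORT B =====
-- port of Source B's while loop: peel off rest[:3] / rest[3:] until rest is empty
def insertBordersAltGo (border : List String) (result : List (List String)) :
    List (List String) → List (List String)
  | [] => result
  | r :: rest =>
    let chunk := (r :: rest).take 3
    let rest' := (r :: rest).drop 3
    let result' := result ++ chunk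
    if chunk.length = 3 then insertBordersAltGo border (result' ++ [border]) rest'
    else insertBordersAltGo border result' rest'
  termination_by l => l.length
  decreasing_by all_goals simp

def insertBorders_alt (board : List (List String)) : List (List String) :=
  let border : List String := List.replicate board.length "-"
  insertBordersAltGo border [border] board

-- ===== PRECONDITION & SPEC =====
def Spec_insertBorders (board : List (List String)) (out : List (List String)) : Prop := out = insertBorders_alt board
instance (board : List (List String)) (out : List (List String)) : Decidable (Spec_insertBorders board out) := by unfold Spec_insertBorders; infer_instance

-- ===== CLAIM (what is proved, stated in full; the proofs are below) =====
def Claim_equal_insertBorders : Prop := ∀ (board : List (List String)), Dom_insertBorders board → Spec_insertBorders board (insertBorders board)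

-- ===== LEMMAS AND PROOFS =====

-- common characterisation: rows in triples, a border after each full triple
def specChunks (border : List String) : List (List String) → List (List String)
  | a :: b :: c :: rest => a :: b :: c :: border :: specChunks border rest
  | short => short

theorem stepA0 (border : List String) (res : List (List String)) (row : List String) :
    insertStepA border (res, 0) row = (res ++ [row], 1) := by simp [insertStepA]

theorem stepA1 (border : List String) (res : List (List String)) (row : List String) :
    insertStepA border (res, 1) row = (res ++ [row], 2) := by simp [insertStepA]

theorem stepA2 (border : List String) (res : List (List String)) (row : List String) :
    insertStepA border (res, 2) row = (res ++ [row] ++ [border], 0) := by simp [insertStepA]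

theorem foldA_eq (border : List String) :
    ∀ (bs res : List (List String)),
      (bs.foldl (insertStepA border) (res, 0)).1 = res ++ specChunks border bs := by
  intro bs
  induction bs using specChunks.induct with
  | case1 a b c rest ih =>
    intro res
    rw [List.foldl_cons, stepA0, List.foldl_cons, stepA1, List.foldl_cons, stepA2, ih]
    simp [specChunks]
  | case2 short h =>
    intro res
    match short, h with
    | [], _ => simp [specChunks]
    | [a], _ => simp [List.foldl, stepA0, specChunks]
    | [a,b], _ => simp [List.foldl, stepA0, stepA1, specChunks]
    | a :: b :: c :: rest, h => exact (h a b c rest rfl).elim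

theorem altGo_eq (border : List String) :
    ∀ (bs res : List (List String)),
      insertBordersAltGo border res bs = res ++ specChunks border bs := by
  intro bs
  induction bs using specChunks.induct with
  | case1 a b c rest ih =>
    intro res
    rw [insertBordersAltGo]
    simp [ih, specChunks]
  | case2 short h =>
    intro res
    match short, h with
    | [], _ => simp [insertBordersAltGo, specChunks]
    | [a], _ => simp [insertBordersAltGo, specChunks]
    | [a,b], _ => simp [insertBordersAltGo, specChunks]
    | a :: b :: c :: rest, h => exact (h a b c rest rfl).elim

-- ===== VERDICT (by name: the statement is the Claim_ definition above) =====
theorem insertBorders_spec : Claim_equal_insertBorders := by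
  intro board _
  unfold Spec_insertBorders insertBorders insertBorders_alt
  simp only [foldA_eq, altGo_eq]
  simp
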